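-- pv_equiv track=rewrite | github.com/shisa-ai/shisad | src/shisad/daemon/handlers/_impl_session.py | _blocked_action_feedback
-- ===== SOURCE A (Python) =====
-- _REJECTION_REASON_SPLITTER = ","
--
-- _GENERIC_BLOCKED_ACTION_MESSAGE = (
--     "I could not safely execute the proposed action(s) under current policy."
-- )
--
-- def _flatten_rejection_reason_codes(reasons: list[str]) -> list[str]:
--     codes: list[str] = []
--     for raw in reasons:
--         for token in str(raw).split(_REJECTION_REASON_SPLITTER):
--             normalized = token.strip()
--             if normalized:
--                 codes.append(normalized)
--     return codes
--
-- def _blocked_action_feedback(reasons: list[str]) -> str: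
--     codes = _flatten_rejection_reason_codes(reasons)
--     if any(
--         code
--         in {
--             "web_search_disabled",
--             "web_fetch_disabled",
--             "web_allowlist_unconfigured",
--             "web_search_backend_unconfigured",
--             "web_search_backend_not_allowlisted",
--             "ip_literal_not_allowlisted",
--             "local_destination_not_allowlisted",
--             "missing_host",
--             "unsupported_backend_scheme",
--             "search_backend_too_many_redirects",
--             "search_backend_redirect_missing_location",
--             "search_backend_request_failed",
--             "destination_not_allowlisted",
--             "unsupported_scheme",
--         }
--         for code in codes
--     ):
--         return (
--             "I couldn't complete that request because live web access is disabled or "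
--             "restricted by this daemon policy."
--         )
--     if any(
--         code
--         in {
--             "http.request_allowlist_required",
--             "http.request_wildcard_disallowed",
--             "egress_wildcard_disallowed_without_break_glass",
--         }
--         for code in codes
--     ):
--         return (
--             "I couldn't complete that request because external network destinations are "
--             "restricted by policy in this session."
--         )
--     if any(code == "trace:stage2_upgrade_required" for code in codes):
--         return (
--             "I couldn't complete that request because it requires elevated runtime actions "
--             "(for example network or write operations) that are blocked without approval."
--         )
--     if any(code == "trace:tdg_dependency_path_missing" for code in codes):
--         return (
--             "I couldn't complete that request because the proposed side-effect action "
--             "was not grounded in the committed goal or an approved prior step."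
--         )
--     if any(code == "trace:tdg_confirmation_required" for code in codes):
--         return (
--             "I need explicit confirmation because the proposed read action was not "
--             "grounded in the committed goal or a prior approved step."
--         )
--     if any(code == "session_in_lockdown" for code in codes):
--         return (
--             "I couldn't complete that request because this session is in lockdown. "
--             "An operator can resume it via the control API."
--         )
--     if codes:
--         return (
--             "I could not safely execute the proposed action(s) under current policy "
--             f"(reason: {codes[0]})."
--         )
--     return _GENERIC_BLOCKED_ACTION_MESSAGE
-- ===== SOURCE B (Python) =====
-- _REJECTION_REASON_SPLITTER = ","
--
-- _GENERIC_BLOCKED_ACTION_MESSAGE = (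
--     "I could not safely execute the proposed action(s) under current policy."
-- )
--
-- _RULES = [
--     (
--         (
--             "web_search_disabled",
--             "web_fetch_disabled",
--             "web_allowlist_unconfigured",
--             "web_search_backend_unconfigured",
--             "web_search_backend_not_allowlisted",
--             "ip_literal_not_allowlisted",
--             "local_destination_not_allowlisted",
--             "missing_host",
--             "unsupported_backend_scheme",
--             "search_backend_too_many_redirects",
--             "search_backend_redirect_missing_location",
--             "search_backend_request_failed",
--             "destination_not_allowlisted",
--             "unsupported_scheme",
--         ),
--         "I couldn't complete that request because live web access is disabled or "
--         "restricted by this daemon policy.",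
--     ),
--     (
--         (
--             "http.request_allowlist_required",
--             "http.request_wildcard_disallowed",
--             "egress_wildcard_disallowed_without_break_glass",
--         ),
--         "I couldn't complete that request because external network destinations are "
--         "restricted by policy in this session.",
--     ),
--     (
--         ("trace:stage2_upgrade_required",),
--         "I couldn't complete that request because it requires elevated runtime actions "
--         "(for example network or write operations) that are blocked without approval.",
--     ),
--     (
--         ("trace:tdg_dependency_path_missing",),
--         "I couldn't complete that request because the proposed side-effect action "
--         "was not grounded in the committed goal or an approved prior step.",
--     ),
--     (
--         ("trace:tdg_confirmation_required",),
--         "I need explicit confirmation because the proposed read action was not "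
--         "grounded in the committed goal or a prior approved step.",
--     ),
--     (
--         ("session_in_lockdown",),
--         "I couldn't complete that request because this session is in lockdown. "
--         "An operator can resume it via the control API.",
--     ),
-- ]
--
-- # Inverted index: each trigger code maps to its rule's priority rank and message.
-- _CODE_RANK = {
--     code: (rank, message)
--     for rank, (trigger, message) in enumerate(_RULES)
--     for code in trigger
-- }
--
-- def _blocked_action_feedback(reasons: list[str]) -> str:
--     codes = [
--         normalized
--         for raw in reasons
--         for normalized in (token.strip() for token in str(raw).split(_REJECTION_REASON_SPLITTER))
--         if normalized
--     ]
--     # One pass over the codes: keep the recognized hit of lowest rank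
--     # (= highest-priority rule), which is exactly the rule A's ordered
--     # branch chain would fire first.
--     best = None
--     for code in codes:
--         hit = _CODE_RANK.get(code)
--         if hit is not None and (best is None or hit[0] < best[0]):
--             best = hit
--     if best is not None:
--         return best[1]
--     if codes:
--         return (
--             "I could not safely execute the proposed action(s) under current policy "
--             f"(reason: {codes[0]})."
--         )
--     return _GENERIC_BLOCKED_ACTION_MESSAGE
-- ===== Notes on version B (the rewrite author's own statement) =====
-- stated objective: alternative
-- what changed: A scans the six rule groups in priority order testing each against the codes; B inverts the data into a precomputed code->(priority,message) dictionary and makes a single min-by-priority pass over the flattened codes, returning the lowest-rank hit (correct because A's first firing branch is exactly the minimum-rank rule any code triggers).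
import Mathlib
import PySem

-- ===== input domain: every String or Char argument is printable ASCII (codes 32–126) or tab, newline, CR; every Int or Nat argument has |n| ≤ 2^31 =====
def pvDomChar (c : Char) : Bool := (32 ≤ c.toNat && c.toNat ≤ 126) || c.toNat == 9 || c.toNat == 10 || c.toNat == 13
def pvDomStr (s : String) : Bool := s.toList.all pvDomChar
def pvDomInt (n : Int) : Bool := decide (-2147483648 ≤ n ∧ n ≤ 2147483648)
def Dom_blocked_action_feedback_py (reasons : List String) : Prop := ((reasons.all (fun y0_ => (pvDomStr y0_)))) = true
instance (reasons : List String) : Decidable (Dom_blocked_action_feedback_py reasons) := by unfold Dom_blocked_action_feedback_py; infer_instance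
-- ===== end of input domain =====

-- ===== PORT A =====
-- B replaces A's ordered scan of rule groups by a code->(priority,message) index and one
-- min-by-priority pass over the codes (objective: alternative algorithm); return values proved equal.
-- raw.split(","): sep is the non-empty constant ",", so Python's split never raises; split? is always some here
def pvSplit (raw : String) : List String := (PySem.Str.split? raw ",").getD []

def pvGenericMsg : String :=
  "I could not safely execute the proposed action(s) under current policy."

-- _flatten_rejection_reason_codes, literal: accumulator built by nested loops with append
def pvFlattenA (reasons : List String) : List String :=
  reasons.foldl (fun codes raw =>
    (pvSplit raw).foldl (fun codes token =>
      let normalized := PySem.Str.strip token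
      if normalized ≠ "" then codes ++ [normalized] else codes) codes) []

def pvWebCodes : List String :=
  ["web_search_disabled", "web_fetch_disabled", "web_allowlist_unconfigured",
   "web_search_backend_unconfigured", "web_search_backend_not_allowlisted",
   "ip_literal_not_allowlisted", "local_destination_not_allowlisted", "missing_host",
   "unsupported_backend_scheme", "search_backend_too_many_redirects",
   "search_backend_redirect_missing_location", "search_backend_request_failed",
   "destination_not_allowlisted", "unsupported_scheme"]

def pvEgressCodes : List String :=
  ["http.request_allowlist_required", "http.request_wildcard_disallowed",
   "egress_wildcard_disallowed_without_break_glass"]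

def pvMsgWeb : String :=
  "I couldn't complete that request because live web access is disabled or restricted by this daemon policy."
def pvMsgEgress : String :=
  "I couldn't complete that request because external network destinations are restricted by policy in this session."
def pvMsgStage2 : String :=
  "I couldn't complete that request because it requires elevated runtime actions (for example network or write operations) that are blocked without approval."
def pvMsgTdgDep : String :=
  "I couldn't complete that request because the proposed side-effect action was not grounded in the committed goal or an approved prior step."
def pvMsgTdgConf : String :=
  "I need explicit confirmation because the proposed read action was not grounded in the committed goal or a prior approved step."
def pvMsgLockdown : String :=
  "I couldn't complete that request because this session is in lockdown. An operator can resume it via the control API."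

def blocked_action_feedback_py (reasons : List String) : String :=
  let codes := pvFlattenA reasons
  if codes.any (fun code => pvWebCodes.contains code) then pvMsgWeb
  else if codes.any (fun code => pvEgressCodes.contains code) then pvMsgEgress
  else if codes.any (fun code => code == "trace:stage2_upgrade_required") then pvMsgStage2
  else if codes.any (fun code => code == "trace:tdg_dependency_path_missing") then pvMsgTdgDep
  else if codes.any (fun code => code == "trace:tdg_confirmation_required") then pvMsgTdgConf
  else if codes.any (fun code => code == "session_in_lockdown") then pvMsgLockdown
  else match codes with
    | [] => pvGenericMsg
    | c :: _ =>
        "I could not safely execute the proposed action(s) under current policy (reason: " ++ c ++ ")."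

-- ===== PORT B =====
-- the _RULES table of Source B, in priority order
def pvRules : List (List String × String) :=
  [(pvWebCodes, pvMsgWeb),
   (pvEgressCodes, pvMsgEgress),
   (["trace:stage2_upgrade_required"], pvMsgStage2),
   (["trace:tdg_dependency_path_missing"], pvMsgTdgDep),
   (["trace:tdg_confirmation_required"], pvMsgTdgConf),
   (["session_in_lockdown"], pvMsgLockdown)]

-- _CODE_RANK: the dict comprehension over enumerate(_RULES)
def pvCodeRank : PySem.Dict String (Int × String) :=
  (PySem.List.enumerate pvRules 0).foldl (fun d p =>
    p.2.1.foldl (fun d code => d.insert code (p.1, p.2.2)) d) PySem.Dict.empty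

-- Source B's comprehension: one flatMap with map strip / filter nonempty
def pvFlattenB (reasons : List String) : List String :=
  reasons.flatMap (fun raw =>
    ((pvSplit raw).map PySem.Str.strip).filter (fun n => n ≠ ""))

-- the 'for code in codes' min-tracking loop body
def pvStep (best : Option (Int × String)) (code : String) : Option (Int × String) :=
  match pvCodeRank.get? code with
  | none => best
  | some hit =>
      match best with
      | none => some hit
      | some b => if hit.1 < b.1 then some hit else some b

def blocked_action_feedback_py_alt (reasons : List String) : String :=
  let codes := pvFlattenB reasons
  let best := codes.foldl pvStep none
  match best with
  | some p => p.2
  | none =>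
      match codes with
      | [] => pvGenericMsg
      | c :: _ =>
          "I could not safely execute the proposed action(s) under current policy (reason: " ++ c ++ ")."

-- ===== PRECONDITION & SPEC =====
def Spec_blocked_action_feedback_py (reasons : List String) (out : String) : Prop := out = blocked_action_feedback_py_alt reasons
instance (reasons : List String) (out : String) : Decidable (Spec_blocked_action_feedback_py reasons out) := by unfold Spec_blocked_action_feedback_py; infer_instance

-- ===== CLAIM (what is proved, stated in full; the proofs are below) =====
def Claim_equal_blocked_action_feedback_py : Prop := ∀ (reasons : List String), Dom_blocked_action_feedback_py reasons → Spec_blocked_action_feedback_py reasons (blocked_action_feedback_py reasons)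

-- ===== LEMMAS AND PROOFS =====

-- A's inner token loop appends exactly the stripped, non-empty tokens
lemma pvFlatten_inner (toks : List String) (acc : List String) :
    toks.foldl (fun codes token =>
      let normalized := PySem.Str.strip token
      if normalized ≠ "" then codes ++ [normalized] else codes) acc
    = acc ++ (toks.map PySem.Str.strip).filter (fun n => n ≠ "") := by
  induction toks generalizing acc with
  | nil => simp
  | cons t ts ih =>
      rw [List.foldl_cons, ih]
      by_cases h : PySem.Str.strip t = "" <;> simp [h]

-- A's outer loop, with a generalized accumulator
lemma pvFlatten_outer (reasons acc : List String) :
    reasons.foldl (fun codes raw =>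
      (pvSplit raw).foldl (fun codes token =>
        let normalized := PySem.Str.strip token
        if normalized ≠ "" then codes ++ [normalized] else codes) codes) acc
    = acc ++ reasons.flatMap (fun raw =>
        ((pvSplit raw).map PySem.Str.strip).filter (fun n => n ≠ "")) := by
  induction reasons generalizing acc with
  | nil => simp
  | cons r rs ih => rw [List.foldl_cons, pvFlatten_inner, ih, List.flatMap_cons, List.append_assoc]

-- the two flattenings agree
lemma pvFlatten_eq (reasons : List String) : pvFlattenA reasons = pvFlattenB reasons := by
  unfold pvFlattenA pvFlattenB
  rw [pvFlatten_outer]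
  simp

-- left-biased minimum-by-rank combination; pvStep best code = pvCombine best (get? code)
def pvCombine (best r : Option (Int × String)) : Option (Int × String) :=
  match r with
  | none => best
  | some hit =>
      match best with
      | none => some hit
      | some b => if hit.1 < b.1 then some hit else some b

lemma pvStep_eq (b : Option (Int × String)) (c : String) :
    pvStep b c = pvCombine b (pvCodeRank.get? c) := rfl

lemma pvCombine_none_left (r : Option (Int × String)) : pvCombine none r = r := by
  cases r <;> rfl

lemma pvCombine_assoc (a b c : Option (Int × String)) :
    pvCombine (pvCombine a b) c = pvCombine a (pvCombine b c) := by
  rcases a with _ | a <;> rcases b with _ | b <;> rcases c with _ | c <;>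
    simp only [pvCombine] <;> split_ifs <;> simp only [pvCombine] <;> split_ifs <;>
    first | rfl | omega

lemma pvFold_none (cs : List String) : ∀ b : Option (Int × String),
    cs.foldl pvStep b = pvCombine b (cs.foldl pvStep none) := by
  induction cs with
  | nil => intro b; cases b <;> rfl
  | cons c cs ih =>
      intro b
      rw [List.foldl_cons, List.foldl_cons, ih, ih (pvStep none c),
        pvStep_eq, pvStep_eq, pvCombine_none_left, pvCombine_assoc]

-- A's branch chain as an Option-valued rank table
def pvF (codes : List String) : Option (Int × String) :=
  if codes.any (fun code => pvWebCodes.contains code) then some (0, pvMsgWeb)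
  else if codes.any (fun code => pvEgressCodes.contains code) then some (1, pvMsgEgress)
  else if codes.any (fun code => code == "trace:stage2_upgrade_required") then some (2, pvMsgStage2)
  else if codes.any (fun code => code == "trace:tdg_dependency_path_missing") then some (3, pvMsgTdgDep)
  else if codes.any (fun code => code == "trace:tdg_confirmation_required") then some (4, pvMsgTdgConf)
  else if codes.any (fun code => code == "session_in_lockdown") then some (5, pvMsgLockdown)
  else none

lemma pvLook_web (c : String) (h : pvWebCodes.contains c = true) :
    pvCodeRank.get? c = some (0, pvMsgWeb) := by
  simp [pvWebCodes] at h
  rcases h with rfl | rfl | rfl | rfl | rfl | rfl | rfl | rfl | rfl | rfl | rfl | rfl | rfl | rfl <;> decide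

lemma pvLook_egress (c : String) (h : pvEgressCodes.contains c = true) :
    pvCodeRank.get? c = some (1, pvMsgEgress) := by
  simp [pvEgressCodes] at h
  rcases h with rfl | rfl | rfl <;> decide

lemma pvLook_none (c : String)
    (h0 : pvWebCodes.contains c = false) (h1 : pvEgressCodes.contains c = false)
    (h2 : (c == "trace:stage2_upgrade_required") = false)
    (h3 : (c == "trace:tdg_dependency_path_missing") = false)
    (h4 : (c == "trace:tdg_confirmation_required") = false)
    (h5 : (c == "session_in_lockdown") = false) :
    pvCodeRank.get? c = none := by
  rw [PySem.Dict.get?_eq_none_iff_not_mem_keys]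
  have hk : pvCodeRank.keys = pvWebCodes ++ pvEgressCodes ++
      ["trace:stage2_upgrade_required", "trace:tdg_dependency_path_missing",
       "trace:tdg_confirmation_required", "session_in_lockdown"] := by decide
  rw [hk]
  simp [pvWebCodes, pvEgressCodes] at h0 h1 ⊢
  simp_all

-- one cons step of A's chain is one pvCombine step with the head's index lookup
set_option maxRecDepth 8192 in
lemma pvF_cons (c : String) (cs : List String) :
    pvF (c :: cs) = pvCombine (pvCodeRank.get? c) (pvF cs) := by
  by_cases h0 : pvWebCodes.contains c = true
  · rw [pvLook_web c h0]
    simp only [pvF, List.any_cons, h0, Bool.true_or, if_true]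
    split_ifs <;> simp [pvCombine]
  · have hb0 : pvWebCodes.contains c = false := by simpa using h0
    by_cases h1 : pvEgressCodes.contains c = true
    · rw [pvLook_egress c h1]
      simp only [pvF, List.any_cons, hb0, h1, Bool.false_or, Bool.true_or, if_true]
      split_ifs <;> simp [pvCombine]
    · have hb1 : pvEgressCodes.contains c = false := by simpa using h1
      by_cases h2 : (c == "trace:stage2_upgrade_required") = true
      · rw [show pvCodeRank.get? c = some (2, pvMsgStage2) from by
          rw [show c = "trace:stage2_upgrade_required" from by simpa using h2]; decide]
        simp only [pvF, List.any_cons, hb0, hb1, h2, Bool.false_or, Bool.true_or, if_true]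
        split_ifs <;> simp [pvCombine]
      · have hb2 : (c == "trace:stage2_upgrade_required") = false := by simpa using h2
        by_cases h3 : (c == "trace:tdg_dependency_path_missing") = true
        · rw [show pvCodeRank.get? c = some (3, pvMsgTdgDep) from by
            rw [show c = "trace:tdg_dependency_path_missing" from by simpa using h3]; decide]
          simp only [pvF, List.any_cons, hb0, hb1, hb2, h3, Bool.false_or, Bool.true_or, if_true]
          split_ifs <;> simp [pvCombine]
        · have hb3 : (c == "trace:tdg_dependency_path_missing") = false := by simpa using h3
          by_cases h4 : (c == "trace:tdg_confirmation_required") = true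
          · rw [show pvCodeRank.get? c = some (4, pvMsgTdgConf) from by
              rw [show c = "trace:tdg_confirmation_required" from by simpa using h4]; decide]
            simp only [pvF, List.any_cons, hb0, hb1, hb2, hb3, h4, Bool.false_or, Bool.true_or, if_true]
            split_ifs <;> simp [pvCombine]
          · have hb4 : (c == "trace:tdg_confirmation_required") = false := by simpa using h4
            by_cases h5 : (c == "session_in_lockdown") = true
            · rw [show pvCodeRank.get? c = some (5, pvMsgLockdown) from by
                rw [show c = "session_in_lockdown" from by simpa using h5]; decide]
              simp only [pvF, List.any_cons, hb0, hb1, hb2, hb3, hb4, h5, Bool.false_or, Bool.true_or, if_true]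
              split_ifs <;> simp [pvCombine]
            · have hb5 : (c == "session_in_lockdown") = false := by simpa using h5
              rw [pvLook_none c hb0 hb1 hb2 hb3 hb4 hb5, pvCombine_none_left]
              simp only [pvF, List.any_cons, hb0, hb1, hb2, hb3, hb4, hb5, Bool.false_or]

-- B's min-tracking fold computes A's branch chain
lemma pvM_eq_F (codes : List String) : codes.foldl pvStep none = pvF codes := by
  induction codes with
  | nil => rfl
  | cons c cs ih =>
      rw [List.foldl_cons, pvFold_none, pvStep_eq, pvCombine_none_left, ih, pvF_cons]

-- ===== VERDICT (by name: the statement is the Claim_ definition above) =====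
theorem blocked_action_feedback_py_spec : Claim_equal_blocked_action_feedback_py := by
  intro reasons _
  unfold Spec_blocked_action_feedback_py blocked_action_feedback_py blocked_action_feedback_py_alt
  simp only [pvFlatten_eq, pvM_eq_F]
  unfold pvF
  split_ifs <;> simp
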